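-- pv_equiv track=rewrite | github.com/ozodbekAI/WBCHEKCER | app/routers/issues.py | _normalize_assignee_ids
-- ===== SOURCE A (Python) =====
-- from typing import Any, Dict, List, Optional
--
-- def _normalize_assignee_ids(primary_id: Optional[int], extra_ids: List[int]) -> List[int]:
--     normalized: List[int] = []
--     seen: set[int] = set()
--     for raw in ([primary_id] if primary_id is not None else []) + list(extra_ids or []):
--         try:
--             user_id = int(raw)
--         except (TypeError, ValueError):
--             continue
--         if user_id <= 0 or user_id in seen:
--             continue
--         seen.add(user_id)
--         normalized.append(user_id)
--     return normalized
-- ===== SOURCE B (Python) =====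
-- from typing import Any, Dict, List, Optional
--
-- def _normalize_assignee_ids(primary_id: Optional[int], extra_ids: List[int]) -> List[int]:
--     # Stage 1: validation pass (int-convertible and positive); duplicates kept.
--     valid: List[int] = []
--     for raw in ([primary_id] if primary_id is not None else []) + list(extra_ids or []):
--         try:
--             user_id = int(raw)
--         except (TypeError, ValueError):
--             continue
--         if user_id > 0:
--             valid.append(user_id)
--
--     # Stage 2: dedup by deletion, no auxiliary set: repeatedly take the head and
--     # delete every later occurrence of it from the remaining list.
--     normalized: List[int] = []
--     rest = valid
--     while rest:
--         head = rest[0]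
--         normalized.append(head)
--         rest = [x for x in rest[1:] if x != head]
--     return normalized
-- ===== Notes on version B (the rewrite author's own statement) =====
-- stated objective: alternative
-- what changed: Replaces A's single fused loop that maintains a seen-set alongside the output by a staged design: a validation pass collecting positive ids, then a dedup-by-deletion loop that repeatedly takes the head and deletes all its later occurrences from the remaining list, using no auxiliary set at all.
import Mathlib
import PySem

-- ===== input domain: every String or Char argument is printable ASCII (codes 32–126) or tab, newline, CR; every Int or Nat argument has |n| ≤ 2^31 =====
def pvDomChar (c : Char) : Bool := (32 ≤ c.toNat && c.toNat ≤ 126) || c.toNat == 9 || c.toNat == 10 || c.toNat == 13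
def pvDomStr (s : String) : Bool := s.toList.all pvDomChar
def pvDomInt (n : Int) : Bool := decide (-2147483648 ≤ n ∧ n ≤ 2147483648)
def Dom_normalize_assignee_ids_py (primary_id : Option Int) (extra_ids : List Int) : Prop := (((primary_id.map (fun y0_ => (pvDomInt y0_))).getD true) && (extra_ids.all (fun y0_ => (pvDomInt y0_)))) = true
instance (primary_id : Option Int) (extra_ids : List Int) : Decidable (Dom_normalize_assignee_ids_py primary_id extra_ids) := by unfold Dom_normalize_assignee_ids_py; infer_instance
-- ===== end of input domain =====

-- B stages the work (validation pass, then a recursive duplicate-deletion dedup with no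
-- auxiliary set) instead of A's fused seen-set loop; equal return value proved on all inputs.

-- ===== PORT A =====
-- A: one fused loop keeping (normalized, seen); int(raw) is the identity on Int, so the try/except never fires.
def normalize_assignee_ids_py (primary_id : Option Int) (extra_ids : List Int) : List Int :=
  let items : List Int := (match primary_id with | some p => [p] | none => []) ++ extra_ids
  (items.foldl
    (fun (st : List Int × PySem.Set Int) raw =>
      if raw ≤ 0 || st.2.contains raw then st
      else (st.1 ++ [raw], PySem.Set.add st.2 raw))
    ([], PySem.Set.empty)).1

-- ===== PORT B =====
-- B's stage 2 while-loop: take the head, delete every later occurrence of it from the rest,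
-- continue on the shrunken list (ported as the structural recursion on the shrinking list).
def pvDedupDelete : List Int → List Int
  | [] => []
  | h :: t => h :: pvDedupDelete (t.filter (fun x => x != h))
termination_by l => l.length
decreasing_by
  simpa using Nat.lt_succ_of_le (List.length_filter_le _ t)

def normalize_assignee_ids_py_alt (primary_id : Option Int) (extra_ids : List Int) : List Int :=
  let items : List Int := (match primary_id with | some p => [p] | none => []) ++ extra_ids
  let valid : List Int := items.foldl (fun acc raw => if 0 < raw then acc ++ [raw] else acc) []
  pvDedupDelete valid

-- ===== PRECONDITION & SPEC =====
def Spec_normalize_assignee_ids_py (primary_id : Option Int) (extra_ids : List Int) (out : List Int) : Prop := out = normalize_assignee_ids_py_alt primary_id extra_ids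
instance (primary_id : Option Int) (extra_ids : List Int) (out : List Int) : Decidable (Spec_normalize_assignee_ids_py primary_id extra_ids out) := by unfold Spec_normalize_assignee_ids_py; infer_instance

-- ===== CLAIM =====
def Claim_equal_normalize_assignee_ids_py : Prop := ∀ (primary_id : Option Int) (extra_ids : List Int), Dom_normalize_assignee_ids_py primary_id extra_ids → Spec_normalize_assignee_ids_py primary_id extra_ids (normalize_assignee_ids_py primary_id extra_ids)

-- ===== LEMMAS AND PROOFS =====

-- A's fused loop, started on a diagonal state (s, s) with the same list as output and seen-set,
-- computes the conditional Set.add fold of the positive elements.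
lemma aLoop_diag (l : List Int) (s : PySem.Set Int) :
    (l.foldl
      (fun (st : List Int × PySem.Set Int) raw =>
        if raw ≤ 0 || st.2.contains raw then st
        else (st.1 ++ [raw], PySem.Set.add st.2 raw)) (s, s)).1
      = l.foldl (fun t x => if x ≤ 0 then t else PySem.Set.add t x) s := by
  induction l generalizing s with
  | nil => rfl
  | cons x xs ih =>
    simp only [List.foldl_cons]
    by_cases hx : x ≤ 0
    · rw [if_pos (by simp [hx]), if_pos hx]; exact ih s
    · by_cases hm : s.contains x
      · have hmem : x ∈ s := by simpa [PySem.Set.contains] using hm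
        have hadd : PySem.Set.add s x = s := PySem.Set.add_of_mem hmem
        rw [if_pos (by simp [hmem] : (decide (x ≤ 0) || s.contains x) = true), if_neg hx, hadd]
        exact ih s
      · have hnm : x ∉ s := by simpa [PySem.Set.contains] using hm
        have hadd : PySem.Set.add s x = s ++ [x] := PySem.Set.add_of_not_mem hnm
        rw [if_neg (by simp [hx, hnm] : ¬ (decide (x ≤ 0) || s.contains x) = true), if_neg hx, ← hadd]
        exact ih (PySem.Set.add s x)

-- Folding the conditional Set.add over l equals folding Set.add over the positive filter.
lemma condAdd_eq_filter (l : List Int) (s : PySem.Set Int) :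
    l.foldl (fun t x => if x ≤ 0 then t else PySem.Set.add t x) s
      = (l.filter (fun x => decide (0 < x))).foldl PySem.Set.add s := by
  induction l generalizing s with
  | nil => rfl
  | cons x xs ih =>
    by_cases hx : x ≤ 0
    · have : ¬ (0 < x) := by omega
      simp [List.foldl_cons, hx, this, ih]
    · have : 0 < x := by omega
      simp [List.foldl_cons, hx, this, ih]

-- Invariant connecting the Set.add fold to B's duplicate-deletion recursion: the fold starting
-- from s appends exactly the dedup-by-deletion of the elements of l not already in s.
lemma foldAdd_eq_dedupDelete (l : List Int) (s : PySem.Set Int) :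
    l.foldl PySem.Set.add s = s ++ pvDedupDelete (l.filter (fun x => !s.contains x)) := by
  induction l generalizing s with
  | nil => simp [pvDedupDelete]
  | cons x t ih =>
    simp only [List.foldl_cons, List.filter_cons]
    by_cases hm : x ∈ s
    · have hc : s.contains x = true := by simpa [PySem.Set.contains] using hm
      rw [PySem.Set.add_of_mem hm]
      simp only [hc, Bool.not_true, if_neg Bool.false_ne_true]
      exact ih s
    · have hc : s.contains x = false := by
        simpa [PySem.Set.contains] using hm
      rw [PySem.Set.add_of_not_mem hm]
      simp only [hc, Bool.not_false]

      rw [ih (s ++ [x])]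
      have hfilt : t.filter (fun y => !(s ++ [x]).contains y)
          = (t.filter (fun y => !s.contains y)).filter (fun y => y != x) := by
        rw [List.filter_filter]
        apply List.filter_congr
        intro y _
        by_cases hyx : y = x <;> by_cases hys : y ∈ s <;>
          simp [PySem.Set.contains, hyx, hys]
      rw [hfilt]
      simp [pvDedupDelete]

-- The two pipelines agree on an arbitrary item list.
lemma main_eq (l : List Int) :
    (l.foldl
      (fun (st : List Int × PySem.Set Int) raw =>
        if raw ≤ 0 || st.2.contains raw then st
        else (st.1 ++ [raw], PySem.Set.add st.2 raw)) ([], PySem.Set.empty)).1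
    = pvDedupDelete (l.foldl (fun acc raw => if 0 < raw then acc ++ [raw] else acc) []) := by
  have hvalid : l.foldl (fun acc raw => if 0 < raw then acc ++ [raw] else acc) []
      = l.filter (fun x => decide (0 < x)) := by
    have h := PySem.List.foldl_append_ite_eq_filter (p := fun x : Int => 0 < x) (l := l) (acc := [])
    simpa using h
  have h0 : (([] : List Int), (PySem.Set.empty : PySem.Set Int))
      = ((PySem.Set.empty : PySem.Set Int), (PySem.Set.empty : PySem.Set Int)) := rfl
  rw [hvalid, h0, aLoop_diag, condAdd_eq_filter, foldAdd_eq_dedupDelete]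
  simp [PySem.Set.empty, PySem.Set.contains]

-- ===== VERDICT =====
theorem normalize_assignee_ids_py_spec : Claim_equal_normalize_assignee_ids_py := by
  intro primary_id extra_ids _
  show normalize_assignee_ids_py primary_id extra_ids
      = normalize_assignee_ids_py_alt primary_id extra_ids
  cases primary_id with
  | none => exact main_eq (([] : List Int) ++ extra_ids)
  | some p => exact main_eq ([p] ++ extra_ids)
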